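-- pv_equiv track=rewrite | github.com/etalbert102/geochron | geochron/geotimehash.py | breakdown_hashmap_by_suffix
-- ===== SOURCE A (Python) =====
-- from collections import Counter
--
-- def breakdown_hashmap_by_suffix(hashmap: Counter):
--     """
--     Breaks down a hashmap by the common suffixes.
--     Args:
--         hashmap: the target hashmap
--
--     Returns:
--         A dictionary of dictionaries with each shared suffix serving
--         as the outer key
--     """
--     suffix_dict = {}
--     for key in hashmap:
--         suffix = key.split('_')[-1]  # assuming suffixes are defined after the last underscore
--         if suffix not in suffix_dict:
--             suffix_dict[suffix] = {key: hashmap[key]}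
--         else:
--             suffix_dict[suffix][key] = hashmap[key]
--
--     return suffix_dict
-- ===== SOURCE B (Python) =====
-- from collections import Counter
--
-- def breakdown_hashmap_by_suffix(hashmap: Counter):
--     """Two staged passes: first enumerate the distinct suffixes in first-seen
--     order, then build each suffix's inner dict with its own filtering
--     comprehension over the whole hashmap."""
--     suffixes = dict.fromkeys(key.split('_')[-1] for key in hashmap)
--     return {s: {key: hashmap[key] for key in hashmap if key.split('_')[-1] == s}
--             for s in suffixes}
-- ===== Notes on version B (the rewrite author's own statement) =====
-- stated objective: alternative
-- what changed: A grows the nested dict in a single incremental pass, branching per key on whether its suffix group exists; B is two staged passes with no mutation: it first enumerates the distinct suffixes (dict.fromkeys), then rebuilds each suffix's inner dict by a separate filtering comprehension over the whole hashmap.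
import Mathlib
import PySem

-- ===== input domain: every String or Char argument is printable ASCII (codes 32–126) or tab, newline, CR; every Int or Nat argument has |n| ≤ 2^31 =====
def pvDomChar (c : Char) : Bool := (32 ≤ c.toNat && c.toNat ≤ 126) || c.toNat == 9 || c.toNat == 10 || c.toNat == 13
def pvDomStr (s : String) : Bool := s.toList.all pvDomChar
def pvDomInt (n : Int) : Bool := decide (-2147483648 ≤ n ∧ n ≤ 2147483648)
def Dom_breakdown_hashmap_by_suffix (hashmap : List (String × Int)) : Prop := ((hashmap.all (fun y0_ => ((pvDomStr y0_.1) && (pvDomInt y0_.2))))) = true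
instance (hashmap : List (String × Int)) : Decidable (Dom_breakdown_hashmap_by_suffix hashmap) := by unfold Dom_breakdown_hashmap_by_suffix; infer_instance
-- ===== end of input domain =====

-- B replaces A's single-pass incremental nested-dict grouping by two staged passes
-- (enumerate the distinct suffixes first, then one filtering comprehension per suffix);
-- objective: alternative.

-- key.split('_')[-1]; split? is `some` since the separator "_" is nonempty, and the
-- resulting list is nonempty so [-1] never raises (getLastD's default is unreachable).
def pvSuffix (k : String) : String := ((PySem.Str.split? k "_").getD []).getLastD ""

-- ===== PORT A =====
-- A's loop: `for key in hashmap` iterates the dict's (unique) keys; `hashmap[key]` is its value.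
def pvALoop (d : PySem.Dict String Int) : PySem.Dict String (PySem.Dict String Int) :=
  d.keys.foldl
    (fun sd key =>
      if sd.contains (pvSuffix key) = false then
        -- suffix_dict[suffix] = {key: hashmap[key]}
        sd.insert (pvSuffix key) (PySem.Dict.empty.insert key (d.getD key 0))
      else
        -- suffix_dict[suffix][key] = hashmap[key]
        sd.modify (pvSuffix key) PySem.Dict.empty (fun inner => inner.insert key (d.getD key 0)))
    PySem.Dict.empty

def breakdown_hashmap_by_suffix (hashmap : List (String × Int)) : List (String × List (String × Int)) :=
  ((pvALoop (PySem.Dict.ofList hashmap)).items).map (fun q => (q.1, q.2.items))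

-- ===== PORT B =====
-- suffixes = dict.fromkeys(key.split('_')[-1] for key in hashmap): the distinct
-- suffixes in first-seen order = PySem.Set.ofList of the mapped keys.
-- Then one dict comprehension per suffix, filtering the whole hashmap's keys.
def breakdown_hashmap_by_suffix_alt (hashmap : List (String × Int)) : List (String × List (String × Int)) :=
  let d := PySem.Dict.ofList hashmap
  (PySem.Set.ofList (d.keys.map pvSuffix)).map
    (fun s =>
      (s, (PySem.Dict.ofList
            ((d.keys.filter (fun key => pvSuffix key == s)).map
              (fun key => (key, d.getD key 0)))).items))

-- ===== PRECONDITION & SPEC =====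
def Spec_breakdown_hashmap_by_suffix (hashmap : List (String × Int)) (out : List (String × List (String × Int))) : Prop := out = breakdown_hashmap_by_suffix_alt hashmap
instance (hashmap : List (String × Int)) (out : List (String × List (String × Int))) : Decidable (Spec_breakdown_hashmap_by_suffix hashmap out) := by unfold Spec_breakdown_hashmap_by_suffix; infer_instance

-- ===== CLAIM (what is proved, stated in full; the proofs are below) =====
def Claim_equal_breakdown_hashmap_by_suffix : Prop := ∀ (hashmap : List (String × Int)), Dom_breakdown_hashmap_by_suffix hashmap → Spec_breakdown_hashmap_by_suffix hashmap (breakdown_hashmap_by_suffix hashmap)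

-- ===== LEMMAS AND PROOFS =====

-- The distinct suffixes of l's keys, in first-seen order.
def pvSufs (l : List (String × Int)) : List String :=
  l.foldl (fun acc kv => if pvSuffix kv.1 ∈ acc then acc else acc ++ [pvSuffix kv.1]) []

-- A's fold step, after the value lookup is resolved and the two branches are unified.
def pvStep (sd : PySem.Dict String (PySem.Dict String Int)) (p : String × Int) :
    PySem.Dict String (PySem.Dict String Int) :=
  sd.insert (pvSuffix p.1) ((sd.getD (pvSuffix p.1) PySem.Dict.empty).insert p.1 p.2)

theorem pvSufs_eq_ofList (l : List (String × Int)) :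
    pvSufs l = PySem.Set.ofList (l.map (fun p => pvSuffix p.1)) := by
  rw [← PySem.Set.update_nil_left, PySem.Set.update_map_eq_foldl_add]
  unfold pvSufs
  apply PySem.List.foldl_congr_mem
  intro acc x _
  simp [PySem.Set.add]

theorem mem_pvSufs (l : List (String × Int)) (s : String) :
    s ∈ pvSufs l ↔ ∃ p ∈ l, pvSuffix p.1 = s := by
  rw [pvSufs_eq_ofList, PySem.Set.mem_ofList]
  simp [eq_comm]

theorem nodup_pvSufs (l : List (String × Int)) : (pvSufs l).Nodup := by
  rw [pvSufs_eq_ofList]; exact PySem.Set.nodup_ofList _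

theorem pvSufs_append_singleton (l : List (String × Int)) (p : String × Int) :
    pvSufs (l ++ [p]) =
      if pvSuffix p.1 ∈ pvSufs l then pvSufs l else pvSufs l ++ [pvSuffix p.1] := by
  unfold pvSufs
  rw [List.foldl_append]
  simp

-- The grouping invariant: folding pvStep over l produces exactly the suffixes of l
-- (in first-occurrence order), each paired with the filtered sub-list of l.
theorem pvGroup_items (l : List (String × Int)) (hnd : (l.map (·.1)).Nodup) :
    (l.foldl pvStep PySem.Dict.empty).items =
      (pvSufs l).map (fun s => (s, PySem.Dict.mk (l.filter (fun p => pvSuffix p.1 == s)))) := by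
  induction l using List.reverseRecOn with
  | nil => rfl
  | append_singleton l p ih =>
    rw [List.map_append, List.nodup_append] at hnd
    obtain ⟨hl, -, hdisj⟩ := hnd
    have hp : p.1 ∉ l.map (·.1) := by
      intro h
      exact absurd rfl (hdisj _ h p.1 (List.mem_map_of_mem (List.mem_singleton_self p)))
    have IH := ih hl
    have hkeys : (l.foldl pvStep PySem.Dict.empty).keys = pvSufs l := by
      show (l.foldl pvStep PySem.Dict.empty).items.map (·.1) = pvSufs l
      rw [IH, List.map_map]
      simp [Function.comp_def]
    have hcont : (l.foldl pvStep PySem.Dict.empty).contains (pvSuffix p.1)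
        = decide (pvSuffix p.1 ∈ pvSufs l) := by
      by_cases h : pvSuffix p.1 ∈ pvSufs l
      · have hc := (PySem.Dict.contains_iff_mem_keys (l.foldl pvStep PySem.Dict.empty)
          (pvSuffix p.1)).2 (hkeys ▸ h)
        rw [hc, decide_eq_true h]
      · rw [decide_eq_false h]
        rw [← Bool.not_eq_true]
        intro hc
        exact h (hkeys ▸ (PySem.Dict.contains_iff_mem_keys _ _).1 hc)
    rw [List.foldl_append, List.foldl_cons, List.foldl_nil, pvSufs_append_singleton]
    by_cases hs : pvSuffix p.1 ∈ pvSufs l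
    · -- the suffix already has a group: in-place update of that one entry
      rw [if_pos hs, pvStep,
        PySem.Dict.items_insert_of_contains _ _ (by rw [hcont, decide_eq_true hs]), IH,
        List.map_map]
      apply List.map_congr_left
      intro s hsmem
      simp only [Function.comp_apply]
      by_cases hss : s = pvSuffix p.1
      · rw [if_pos (by simp [hss]), ← hss]
        have hmem : (s, PySem.Dict.mk (l.filter (fun q => pvSuffix q.1 == s)))
            ∈ (l.foldl pvStep PySem.Dict.empty).items := by
          rw [IH]; exact List.mem_map_of_mem hsmem
        have hget := PySem.Dict.getD_of_mem_items _ hmem (by rw [hkeys]; exact nodup_pvSufs l)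
          PySem.Dict.empty
        have hinner : (PySem.Dict.mk (l.filter (fun q => pvSuffix q.1 == s))).contains p.1
            = false := by
          rw [← Bool.not_eq_true]
          intro hc
          simp only [PySem.Dict.contains, List.any_eq_true, beq_iff_eq] at hc
          obtain ⟨q, hq, hq1⟩ := hc
          exact hp (hq1 ▸ List.mem_map_of_mem (List.mem_of_mem_filter hq))
        rw [hget]
        have hins : (PySem.Dict.mk (l.filter (fun q => pvSuffix q.1 == s))).insert p.1 p.2
            = PySem.Dict.mk ((l ++ [p]).filter (fun q => pvSuffix q.1 == s)) := by
          apply PySem.Dict.ext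
          rw [PySem.Dict.items_insert_of_not_contains _ _ hinner]
          simp [List.filter_append, hss]
        rw [hins]
      · have h2 : (pvSuffix p.1 == s) = false := by simp [Ne.symm hss]
        rw [if_neg (by simp [hss])]
        simp [List.filter_append, h2]
    · -- a fresh suffix: a new group is appended at the end
      rw [if_neg hs, pvStep,
        PySem.Dict.items_insert_of_not_contains _ _ (by rw [hcont, decide_eq_false hs]),
        PySem.Dict.getD_of_not_contains _ _ (by rw [hcont, decide_eq_false hs]), IH,
        List.map_append]
      congr 1
      · apply List.map_congr_left
        intro s hsmem
        have hne : (pvSuffix p.1 == s) = false := by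
          simp only [beq_eq_false_iff_ne, ne_eq]
          intro h; exact hs (h ▸ hsmem)
        simp [List.filter_append, hne]
      · have hnil : l.filter (fun q => pvSuffix q.1 == pvSuffix p.1) = [] := by
          rw [List.filter_eq_nil_iff]
          intro q hq
          simp only [Bool.not_eq_true, beq_eq_false_iff_ne, ne_eq]
          intro h
          exact hs ((mem_pvSufs l _).2 ⟨q, hq, h⟩)
        simp only [List.map_cons, List.map_nil, List.filter_append, hnil, List.nil_append]
        simp [PySem.Dict.insert, PySem.Dict.empty, PySem.Dict.contains]

-- A's fold over d.keys, with hashmap[key] looked up in d, is the pvStep fold over d.items.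
theorem pvALoop_eq (d : PySem.Dict String Int) (hnd : d.keys.Nodup) :
    pvALoop d = d.items.foldl pvStep PySem.Dict.empty := by
  unfold pvALoop
  show (d.items.map (·.1)).foldl _ _ = _
  rw [List.foldl_map]
  apply PySem.List.foldl_congr_mem
  intro sd p hpmem
  have hv : d.getD p.1 0 = p.2 :=
    PySem.Dict.getD_of_mem_items d (by exact hpmem) hnd 0
  rw [hv, pvStep]
  by_cases hc : sd.contains (pvSuffix p.1) = true
  · simp only [hc, Bool.true_eq_false, if_false, PySem.Dict.modify]
  · rw [Bool.not_eq_true] at hc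
    simp [hc, PySem.Dict.getD_of_not_contains _ _ hc]

theorem pvOfList_items_of_nodup (l : List (String × Int)) (h : (l.map (·.1)).Nodup) :
    (PySem.Dict.ofList l).items = l := by
  show (PySem.Dict.empty.update l).items = l
  unfold PySem.Dict.update
  rw [PySem.Dict.items_foldl_insert_fresh l (·.1) (·.2) _ (fun a _ => by simp) h]
  simp [PySem.Dict.empty]

-- B's per-suffix comprehension over d's keys yields exactly the filtered items list.
theorem pvInner_eq (d : PySem.Dict String Int) (hnd : d.keys.Nodup) (s : String) :
    (PySem.Dict.ofList
        ((d.keys.filter (fun key => pvSuffix key == s)).map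
          (fun key => (key, d.getD key 0)))).items
      = d.items.filter (fun p => pvSuffix p.1 == s) := by
  have hkeys : d.keys = d.items.map (·.1) := rfl
  have h1 : (d.keys.filter (fun key => pvSuffix key == s)).map (fun key => (key, d.getD key 0))
      = d.items.filter (fun p => pvSuffix p.1 == s) := by
    rw [hkeys, List.filter_map, List.map_map]
    simp only [Function.comp_def]
    refine (List.map_congr_left ?_).trans (List.map_id _)
    intro p hp
    have hv : d.getD p.1 0 = p.2 :=
      PySem.Dict.getD_of_mem_items d (List.mem_of_mem_filter hp) hnd 0
    simp [hv]
  rw [h1]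
  apply pvOfList_items_of_nodup
  exact hnd.sublist (List.Sublist.map _ List.filter_sublist)

-- ===== VERDICT (by name: the statement is the Claim_ definition above) =====
theorem breakdown_hashmap_by_suffix_spec : Claim_equal_breakdown_hashmap_by_suffix := by
  intro hashmap _
  show breakdown_hashmap_by_suffix hashmap = breakdown_hashmap_by_suffix_alt hashmap
  unfold breakdown_hashmap_by_suffix breakdown_hashmap_by_suffix_alt
  have hnd : (PySem.Dict.ofList hashmap).keys.Nodup := PySem.Dict.nodup_keys_ofList hashmap
  have hsufs : PySem.Set.ofList ((PySem.Dict.ofList hashmap).keys.map pvSuffix)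
      = pvSufs (PySem.Dict.ofList hashmap).items := by
    rw [pvSufs_eq_ofList]
    show PySem.Set.ofList (((PySem.Dict.ofList hashmap).items.map (·.1)).map pvSuffix) = _
    rw [List.map_map]
    rfl
  rw [pvALoop_eq _ hnd, pvGroup_items _ hnd, List.map_map]
  simp only [hsufs]
  apply List.map_congr_left
  intro s _
  simp only [Function.comp_apply, pvInner_eq _ hnd s]
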